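-- pv_equiv track=rewrite | github.com/Zoushuang86/leecode | 205-isIsomorphic.py | get_dict
-- ===== SOURCE A (Python) =====
-- def get_dict(s):
--     res = ""
--     i = 97
--     s_dict = {}
--     for e in s:
--         if s_dict.get(e) == None:
--             s_dict[e] = chr(i)
--             res += chr(i)
--             i += 1
--         else:
--             res += s_dict[e]
--     return res
-- ===== SOURCE B (Python) =====
-- def get_dict(s):
--     # canonicalize via first-occurrence-index compression:
--     # rank of each char = position of its first-occurrence index among the
--     # sorted distinct first-occurrence indices (sorted order == discovery order)
--     firsts = sorted(set(s.index(c) for c in s))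
--     return "".join(chr(97 + firsts.index(s.index(e))) for e in s)
-- ===== Notes on version B (the rewrite author's own statement) =====
-- stated objective: alternative
-- what changed: Replaces A's single fused discovery loop (mutable dict + counter + accumulator) by first-occurrence-index compression: collect the set of first-occurrence indices via s.index, sort it, and emit chr(97 + rank of each char's first index in that sorted list); correct because sorted distinct first-occurrence indices coincide with discovery order.
import Mathlib
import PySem

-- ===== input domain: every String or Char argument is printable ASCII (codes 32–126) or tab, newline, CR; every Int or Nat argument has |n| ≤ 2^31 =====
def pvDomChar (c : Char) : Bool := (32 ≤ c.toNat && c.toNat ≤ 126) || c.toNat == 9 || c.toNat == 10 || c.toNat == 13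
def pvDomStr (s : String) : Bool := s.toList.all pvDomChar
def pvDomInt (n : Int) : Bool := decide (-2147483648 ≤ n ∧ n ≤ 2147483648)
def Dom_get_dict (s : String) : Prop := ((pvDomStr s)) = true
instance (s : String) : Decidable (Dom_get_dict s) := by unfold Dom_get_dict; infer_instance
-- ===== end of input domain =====

-- B replaces A's fused discovery loop (mutable dict + counter + accumulator) by
-- first-occurrence-index compression: sort the distinct first-occurrence indices and
-- emit chr(97 + rank of each char's first index); objective: alternative, not faster.


-- ===== PORT A =====
-- A's loop body; the accumulated string `res` is tracked as its character list
-- (String.ofList at the return); chr(i) with 97 ≤ i is Char.ofNat i on this domain.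
def getDictStep (st : List Char × Nat × PySem.Dict Char Char) (e : Char) :
    List Char × Nat × PySem.Dict Char Char :=
  match st.2.2.get? e with
  | none   => (st.1 ++ [Char.ofNat st.2.1], st.2.1 + 1, st.2.2.insert e (Char.ofNat st.2.1))
  | some c => (st.1 ++ [c], st.2.1, st.2.2)

def get_dict (s : String) : String :=
  String.ofList (s.toList.foldl getDictStep ([], 97, PySem.Dict.empty)).1

-- ===== PORT B =====
-- s.index(c) never raises here (c is drawn from s); the .getD default is unreachable.
-- B's first-occurrence index of c in l, as the Python int s.index(c)
def fIdx (l : List Char) (c : Char) : Int := (((PySem.List.index? l c).getD 0 : Nat) : Int)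

def get_dict_alt (s : String) : String :=
  let l := s.toList
  let firsts : List Int :=
    PySem.List.sorted (PySem.Set.ofList (l.map (fun c => fIdx l c))) (fun x => x) false
  String.ofList (l.map (fun e =>
    Char.ofNat (97 + ((PySem.List.index? firsts (fIdx l e)).getD 0))))

-- ===== PRECONDITION & SPEC =====
def Spec_get_dict (s : String) (out : String) : Prop := out = get_dict_alt s
instance (s : String) (out : String) : Decidable (Spec_get_dict s out) := by unfold Spec_get_dict; infer_instance

-- ===== CLAIM (what is proved, stated in full; the proofs are below) =====
def Claim_equal_get_dict : Prop := ∀ (s : String), Dom_get_dict s → Spec_get_dict s (get_dict s)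

-- ===== LEMMAS AND PROOFS =====

-- the rank-to-letter map both sides compute, expressed via first-appearance rank
def rankChar (order : List Char) (e : Char) : Char :=
  Char.ofNat (97 + (PySem.List.index? order e).getD 0)

-- Loop invariant for A: after processing prefix l, the result string is the map of
-- first-appearance ranks over l, the counter is 97 + #distinct, the dict is index? of dedup.
theorem getDict_loop_inv (l : List Char) :
    (l.foldl getDictStep ([], 97, PySem.Dict.empty)).1
        = l.map (rankChar (PySem.List.dedup l))
    ∧ (l.foldl getDictStep ([], 97, PySem.Dict.empty)).2.1
        = 97 + (PySem.List.dedup l).length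
    ∧ ∀ c, (l.foldl getDictStep ([], 97, PySem.Dict.empty)).2.2.get? c
        = (PySem.List.index? (PySem.List.dedup l) c).map (fun k => Char.ofNat (97 + k)) := by
  induction l using List.reverseRecOn with
  | nil => refine ⟨rfl, rfl, fun c => ?_⟩; simp [PySem.List.dedup, PySem.Dict.get?, PySem.Dict.empty, PySem.List.index?]
  | append_singleton l c ih =>
    obtain ⟨hres, hi, hd⟩ := ih
    rw [List.foldl_append]
    by_cases hc : c ∈ PySem.List.dedup l
    · -- seen before: dict hit, nothing new
      have hcl : c ∈ l := (PySem.List.mem_dedup l c).mp hc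
      have hded : PySem.List.dedup (l ++ [c]) = PySem.List.dedup l := by
        simp [PySem.List.dedup_eq_ofList, PySem.Set.ofList_append_singleton, PySem.Set.add,
          PySem.Set.contains, PySem.Set.mem_ofList, hcl]
      obtain ⟨k, hk⟩ := Option.isSome_iff_exists.mp
        ((PySem.List.index?_isSome_iff (PySem.List.dedup l) c).mpr hc)
      have hget : (List.foldl getDictStep ([], 97, PySem.Dict.empty) l).2.2.get? c
          = some (Char.ofNat (97 + k)) := by rw [hd c, hk]; rfl
      refine ⟨?_, ?_, ?_⟩
      · simp only [List.foldl_cons, List.foldl_nil, getDictStep, hget, hded, List.map_append,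
          hres, List.map_cons, List.map_nil, rankChar, hk, Option.getD_some]
      · simp only [List.foldl_cons, List.foldl_nil, getDictStep, hget, hded, hi]
      · intro x
        simp only [List.foldl_cons, List.foldl_nil, getDictStep, hget, hded, hd x]
    · -- fresh char: append to dict, emit chr(i)
      have hcl : c ∉ l := fun h => hc ((PySem.List.mem_dedup l c).mpr h)
      have hded : PySem.List.dedup (l ++ [c]) = PySem.List.dedup l ++ [c] := by
        simp [PySem.List.dedup_eq_ofList, PySem.Set.ofList_append_singleton, PySem.Set.add,
          PySem.Set.contains, PySem.Set.mem_ofList, hcl]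
      have hget : (List.foldl getDictStep ([], 97, PySem.Dict.empty) l).2.2.get? c = none := by
        rw [hd c, (PySem.List.index?_eq_none_iff _ _).mpr hc]; rfl
      refine ⟨?_, ?_, ?_⟩
      · simp only [List.foldl_cons, List.foldl_nil, getDictStep, hget, hded, List.map_append,
          List.map_cons, List.map_nil, hres, hi]
        congr 1
        · exact List.map_congr_left (fun e he => by
            simp only [rankChar, PySem.List.index?_append_of_mem _ ((PySem.List.mem_dedup l e).mpr he)])
        · simp only [rankChar, PySem.List.index?_append_singleton_self _ _ hc, Option.getD_some]
      · simp only [List.foldl_cons, List.foldl_nil, getDictStep, hget, hded, hi,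
          List.length_append, List.length_cons, List.length_nil]
        omega
      · intro x
        by_cases hx : x = c
        · subst hx
          simp only [List.foldl_cons, List.foldl_nil, getDictStep, hget, hi,
            PySem.Dict.get?_insert_self, hded,
            PySem.List.index?_append_singleton_self _ _ hc, Option.map_some]
        · simp only [List.foldl_cons, List.foldl_nil, getDictStep, hget, hded,
            PySem.Dict.get?_insert, if_neg hx, hd x]
          by_cases hxl : x ∈ PySem.List.dedup l
          · rw [PySem.List.index?_append_of_mem _ hxl]
          · rw [(PySem.List.index?_eq_none_iff _ _).mpr hxl,
              (PySem.List.index?_eq_none_iff _ _).mpr (by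
                intro h
                rcases List.mem_append.mp h with h | h
                · exact hxl h
                · exact hx (List.mem_singleton.mp h))]

-- B-side facts --------------------------------------------------------------

theorem fIdx_spec (l : List Char) (c : Char) (hc : c ∈ l) :
    ∃ k : Nat, PySem.List.index? l c = some k ∧ fIdx l c = (k : Int) ∧
      ∃ hk : k < l.length, l[k] = c := by
  obtain ⟨k, hk⟩ := Option.isSome_iff_exists.mp ((PySem.List.index?_isSome_iff l c).mpr hc)
  obtain ⟨hlt, hget, -⟩ := PySem.List.getElem_of_index?_eq_some hk
  exact ⟨k, hk, by simp only [fIdx, hk, Option.getD_some], hlt, hget⟩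

theorem fIdx_inj (l : List Char) (a b : Char) (ha : a ∈ l) (hb : b ∈ l)
    (h : fIdx l a = fIdx l b) : a = b := by
  obtain ⟨k, -, hfa, hk, hga⟩ := fIdx_spec l a ha
  obtain ⟨m, -, hfb, hm, hgb⟩ := fIdx_spec l b hb
  have hkm : (k : Int) = (m : Int) := by rw [← hfa, ← hfb, h]
  have hkm' : k = m := by exact_mod_cast hkm
  subst hkm'
  rw [← hga, ← hgb]

theorem fIdx_lt (l : List Char) (c : Char) (hc : c ∈ l) : fIdx l c < (l.length : Int) := by
  obtain ⟨k, -, hf, hk, -⟩ := fIdx_spec l c hc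
  rw [hf]; exact_mod_cast hk

-- index? commutes with an injective-on-the-list map
theorem index?_map_injOn {α β : Type} [BEq α] [LawfulBEq α] [BEq β] [LawfulBEq β]
    (xs : List α) (f : α → β) (e : α) (he : e ∈ xs)
    (hinj : ∀ x ∈ xs, f x = f e → x = e) :
    PySem.List.index? (xs.map f) (f e) = PySem.List.index? xs e := by
  induction xs with
  | nil => cases he
  | cons x xs ih =>
    by_cases hx : x = e
    · subst hx
      rw [List.map_cons, PySem.List.index?_cons_self, PySem.List.index?_cons_self]
    · have hfx : f x ≠ f e := fun h => hx (hinj x (List.mem_cons_self ..) h)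
      rw [List.map_cons, PySem.List.index?_cons_of_ne (xs.map f) hfx, PySem.List.index?_cons_of_ne xs hx,
        ih (List.mem_of_ne_of_mem (Ne.symm hx) he) (fun y hy h => hinj y (List.mem_cons_of_mem _ hy) h)]

-- the chars of dedup l, mapped to their first-occurrence index, are exactly the distinct
-- first-occurrence indices of l, and they are already strictly increasing
theorem setMap_firsts (l : List Char) :
    PySem.Set.ofList (l.map (fun c => fIdx l c)) = (PySem.List.dedup l).map (fIdx l)
    ∧ ((PySem.List.dedup l).map (fIdx l)).Pairwise (· < ·) := by
  induction l using List.reverseRecOn with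
  | nil => exact ⟨rfl, List.Pairwise.nil⟩
  | append_singleton l c ih =>
    obtain ⟨hset, hpw⟩ := ih
    have hfext : ∀ x ∈ l, fIdx (l ++ [c]) x = fIdx l x := fun x hx => by
      simp only [fIdx, PySem.List.index?_append_of_mem _ hx]
    have hmapl : l.map (fun x => fIdx (l ++ [c]) x) = l.map (fIdx l) :=
      List.map_congr_left hfext
    have hmapd : ∀ d : List Char, (∀ x ∈ d, x ∈ l) →
        d.map (fIdx (l ++ [c])) = d.map (fIdx l) := fun d hd =>
      List.map_congr_left (fun x hx => hfext x (hd x hx))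
    by_cases hc : c ∈ l
    · have hded : PySem.List.dedup (l ++ [c]) = PySem.List.dedup l := by
        simp [PySem.List.dedup_eq_ofList, PySem.Set.ofList_append_singleton, PySem.Set.add,
          PySem.Set.contains, PySem.Set.mem_ofList, hc]
      have hfc : fIdx (l ++ [c]) c = fIdx l c := hfext c hc
      have hmem : fIdx l c ∈ l.map (fIdx l) := List.mem_map_of_mem hc
      refine ⟨?_, ?_⟩
      · rw [List.map_append, List.map_cons, List.map_nil, hmapl, hfc,
          PySem.Set.ofList_append_singleton, hded,
          hmapd _ (fun x hx => (PySem.List.mem_dedup l x).mp hx), ← hset]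
        simp [PySem.Set.add, PySem.Set.contains, PySem.Set.mem_ofList, hmem]
      · rw [hded, hmapd _ (fun x hx => (PySem.List.mem_dedup l x).mp hx)]; exact hpw
    · have hded : PySem.List.dedup (l ++ [c]) = PySem.List.dedup l ++ [c] := by
        simp [PySem.List.dedup_eq_ofList, PySem.Set.ofList_append_singleton, PySem.Set.add,
          PySem.Set.contains, PySem.Set.mem_ofList, hc]
      have hfc : fIdx (l ++ [c]) c = (l.length : Int) := by
        simp only [fIdx, PySem.List.index?_append_singleton_self _ _ hc, Option.getD_some]
      have hnotmem : (l.length : Int) ∉ l.map (fIdx l) := by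
        intro h
        obtain ⟨x, hx, hfx⟩ := List.mem_map.mp h
        exact absurd (fIdx_lt l x hx) (by rw [hfx]; simp)
      refine ⟨?_, ?_⟩
      · rw [List.map_append, List.map_cons, List.map_nil, hmapl, hfc,
          PySem.Set.ofList_append_singleton, hded, List.map_append,
          hmapd _ (fun x hx => (PySem.List.mem_dedup l x).mp hx), ← hset,
          List.map_cons, List.map_nil, hfc]
        simp [PySem.Set.add, PySem.Set.contains, PySem.Set.mem_ofList, hset]
        intro x hx hfx
        exact absurd (fIdx_lt l x hx) (by rw [hfx]; simp)
      · rw [hded, List.map_append, List.map_cons, List.map_nil,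
          hmapd _ (fun x hx => (PySem.List.mem_dedup l x).mp hx), hfc]
        refine List.pairwise_append.mpr ⟨hpw, List.pairwise_singleton _ _, ?_⟩
        intro y hy z hz
        obtain ⟨x, hx, hfx⟩ := List.mem_map.mp hy
        rw [List.mem_singleton.mp hz, ← hfx]
        exact fIdx_lt l x ((PySem.List.mem_dedup l x).mp hx)

-- ===== VERDICT (by name: the statement is the Claim_ definition above) =====
theorem get_dict_spec : Claim_equal_get_dict := by
  intro s _
  unfold Spec_get_dict get_dict get_dict_alt
  rw [(getDict_loop_inv s.toList).1]
  obtain ⟨hset, hpw⟩ := setMap_firsts s.toList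
  have hfirsts : PySem.List.sorted
      (PySem.Set.ofList (s.toList.map (fun c => fIdx s.toList c))) (fun x => x) false
      = (PySem.List.dedup s.toList).map (fIdx s.toList) := by
    refine PySem.List.sorted_eq_of_perm_of_pairwise_lt _ _ _ ?_ ?_
    · rw [hset]
    · exact hpw
  simp only [hfirsts]
  congr 1
  refine List.map_congr_left (fun e he => ?_)
  have hed : e ∈ PySem.List.dedup s.toList := (PySem.List.mem_dedup s.toList e).mpr he
  rw [index?_map_injOn _ _ _ hed (fun x hx h =>
    fIdx_inj s.toList x e ((PySem.List.mem_dedup s.toList x).mp hx) he h)]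
  rfl
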